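-- pv_equiv track=rewrite | github.com/SlyyCooper/OpenCrawl | opencrawl.py | build_html_site_map
-- ===== SOURCE A (Python) =====
-- def build_html_site_map(base_url, adjacency):
--     visited_nodes = set()
--     lines = [f"<h1>Site Map for {base_url}</h1>", "<ul>"]
--
--     def build_submap(url):
--         if url in visited_nodes:
--             return
--         visited_nodes.add(url)
--
--         lines.append(f"<li>{url}")
--         children = sorted(adjacency.get(url, []))
--         if children:
--             lines.append("<ul>")
--             for child_url in children:
--                 build_submap(child_url)
--             lines.append("</ul>")
--         lines.append("</li>")
--
--     build_submap(base_url)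
--     lines.append("</ul>")
--     return "\n".join(lines)
-- ===== SOURCE B (Python) =====
-- def build_html_site_map(base_url, adjacency):
--     visited = set()
--     lines = [f"<h1>Site Map for {base_url}</h1>", "<ul>"]
--     CLOSE = None  # marker: emit "</ul>" then "</li>"
--     stack = [base_url]
--     while stack:
--         item = stack.pop()
--         if item is CLOSE:
--             lines.append("</ul>")
--             lines.append("</li>")
--         elif item in visited:
--             pass
--         else:
--             visited.add(item)
--             lines.append(f"<li>{item}")
--             children = sorted(adjacency.get(item, []))
--             if children:
--                 lines.append("<ul>")
--                 stack.append(CLOSE)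
--                 for c in reversed(children):
--                     stack.append(c)
--             else:
--                 lines.append("</li>")
--     lines.append("</ul>")
--     return "\n".join(lines)
-- ===== Notes on version B (the rewrite author's own statement) =====
-- stated objective: alternative
-- what changed: Replaces A's recursive inner build_submap (DFS via nested function mutating shared visited/lines) with an explicit work-item stack holding urls and close markers, popped iteratively in one while loop; same output, no recursion.
import Mathlib
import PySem

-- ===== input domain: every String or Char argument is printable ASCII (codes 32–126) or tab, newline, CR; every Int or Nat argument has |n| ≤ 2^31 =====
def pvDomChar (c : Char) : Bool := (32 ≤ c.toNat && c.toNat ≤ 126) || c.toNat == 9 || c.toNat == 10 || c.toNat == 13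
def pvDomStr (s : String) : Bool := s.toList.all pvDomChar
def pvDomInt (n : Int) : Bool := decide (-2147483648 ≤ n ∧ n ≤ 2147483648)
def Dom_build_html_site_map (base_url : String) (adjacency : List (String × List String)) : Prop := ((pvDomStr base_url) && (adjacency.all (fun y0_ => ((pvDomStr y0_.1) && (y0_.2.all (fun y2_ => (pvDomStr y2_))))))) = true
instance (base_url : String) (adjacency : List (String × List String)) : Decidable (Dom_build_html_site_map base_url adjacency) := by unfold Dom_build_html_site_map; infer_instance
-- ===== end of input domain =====

-- B replaces A's recursive DFS (inner build_submap mutating shared visited/lines) by an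
-- explicit stack of work items with a close marker — same output, iterative decomposition
-- ('alternative'; no speed claim).

-- `sorted(adjacency.get(url, []))` — shared by both programs (A and Source B both compute it this way)
def pvChildren (adjacency : List (String × List String)) (url : String) : List String :=
  PySem.List.sorted ((PySem.Dict.ofList adjacency).getD url []) (fun x => x) false

-- ===== PORT A =====
-- build_submap: state = (visited_nodes, lines); fuel is a totality guard only
-- (provably never exhausted for the fuel chosen in build_html_site_map below).
def pvBuildSubmap (adjacency : List (String × List String)) :
    Nat → PySem.Set String × List String → String → PySem.Set String × List String
  | 0, st, _ => st
  | f + 1, st, url =>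
    if PySem.Set.contains st.1 url then st
    else
      let vis := PySem.Set.add st.1 url
      let lines := st.2 ++ ["<li>" ++ url]
      let children := pvChildren adjacency url
      let st2 : PySem.Set String × List String :=
        if children.isEmpty then (vis, lines)
        else
          let r := children.foldl (fun s c => pvBuildSubmap adjacency f s c) (vis, lines ++ ["<ul>"])
          (r.1, r.2 ++ ["</ul>"])
      (st2.1, st2.2 ++ ["</li>"])

def build_html_site_map (base_url : String) (adjacency : List (String × List String)) : String :=
  let st := pvBuildSubmap adjacency ((base_url :: adjacency.flatMap Prod.snd).length + 1)
      (PySem.Set.empty, ["<h1>Site Map for " ++ base_url ++ "</h1>", "<ul>"]) base_url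
  PySem.Str.join "\n" (st.2 ++ ["</ul>"])

-- ===== PORT B =====
-- stack items: a url to visit, or the close marker (emit "</ul>" then "</li>")
inductive PvItem : Type
  | close : PvItem
  | url : String → PvItem
deriving DecidableEq, Repr

-- the while-stack loop of Source B; fuel is a totality guard charged only when a new url is
-- visited (provably never exhausted for the fuel chosen in build_html_site_map_alt below).
def pvLoop (adjacency : List (String × List String)) :
    Nat → PySem.Set String → List String → List PvItem → List String
  | _, _, lines, [] => lines
  | f, vis, lines, PvItem.close :: rest =>
      pvLoop adjacency f vis ((lines ++ ["</ul>"]) ++ ["</li>"]) rest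
  | f, vis, lines, PvItem.url u :: rest =>
    if PySem.Set.contains vis u then pvLoop adjacency f vis lines rest
    else
      match f with
      | 0 => lines
      | f + 1 =>
        let vis2 := PySem.Set.add vis u
        let lines2 := lines ++ ["<li>" ++ u]
        let children := pvChildren adjacency u
        if children.isEmpty then pvLoop adjacency f vis2 (lines2 ++ ["</li>"]) rest
        else pvLoop adjacency f vis2 (lines2 ++ ["<ul>"])
              (children.map PvItem.url ++ PvItem.close :: rest)
  termination_by f _ _ stack => (f, stack.length)
  decreasing_by all_goals simp_wf; omega

def build_html_site_map_alt (base_url : String) (adjacency : List (String × List String)) : String :=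
  let lines := pvLoop adjacency ((base_url :: adjacency.flatMap Prod.snd).length + 1)
      PySem.Set.empty ["<h1>Site Map for " ++ base_url ++ "</h1>", "<ul>"] [PvItem.url base_url]
  PySem.Str.join "\n" (lines ++ ["</ul>"])

-- ===== PRECONDITION & SPEC =====
def Spec_build_html_site_map (base_url : String) (adjacency : List (String × List String)) (out : String) : Prop := out = build_html_site_map_alt base_url adjacency
instance (base_url : String) (adjacency : List (String × List String)) (out : String) : Decidable (Spec_build_html_site_map base_url adjacency out) := by unfold Spec_build_html_site_map; infer_instance

-- ===== CLAIM (what is proved, stated in full; the proofs are below) =====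
def Claim_equal_build_html_site_map : Prop := ∀ (base_url : String) (adjacency : List (String × List String)), Dom_build_html_site_map base_url adjacency → Spec_build_html_site_map base_url adjacency (build_html_site_map base_url adjacency)

-- ===== LEMMAS AND PROOFS =====

-- number of urls of the universe UL not yet visited
def pvm (UL : List String) (vis : PySem.Set String) : Nat :=
  ((PySem.List.dedup UL).filter (fun x => !(PySem.Set.contains vis x))).length

theorem pv_add_eq_append (vis : PySem.Set String) (u : String)
    (h : PySem.Set.contains vis u = false) : PySem.Set.add vis u = vis ++ [u] := by
  have h' : u ∉ vis := by simpa [PySem.Set.contains] using h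
  simp [PySem.Set.add, PySem.Set.contains, h']

theorem pv_filter_len_aux (u : String) (p q : String → Bool)
    (hpq : ∀ x, x ≠ u → p x = q x) (hp : p u = true) (hq : q u = false) :
    ∀ (l : List String), l.Nodup → u ∈ l →
      (l.filter q).length + 1 = (l.filter p).length := by
  intro l
  induction l with
  | nil => intro _ h; cases h
  | cons a t ih =>
    intro hnd hmem
    rcases List.nodup_cons.mp hnd with ⟨hat, hndt⟩
    by_cases hau : a = u
    · subst hau
      have ht : t.filter q = t.filter p := by
        apply List.filter_congr
        intro x hx
        exact (hpq x (fun hxu => hat (hxu ▸ hx))).symm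
      simp [List.filter_cons, hp, hq, ht]
    · have hmem' : u ∈ t := by
        rcases hmem with _ | h
        · exact absurd rfl hau
        · assumption
      have : p a = q a := hpq a hau
      by_cases hpa : p a = true
      · simp [List.filter_cons, hpa, this ▸ hpa, ih hndt hmem']
      · have hqa : q a = false := by rw [← this]; simpa using hpa
        simp [List.filter_cons, Bool.eq_false_iff.mpr hpa, hqa, ih hndt hmem']

theorem pv_pvm_append (UL : List String) (vis : PySem.Set String) (u : String)
    (hu : u ∈ UL) (h : PySem.Set.contains vis u = false) :
    pvm UL (vis ++ [u]) + 1 = pvm UL vis := by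
  unfold pvm
  apply pv_filter_len_aux u
      (fun x => !(PySem.Set.contains vis x)) (fun x => !(PySem.Set.contains (vis ++ [u]) x))
  · intro x hx
    simp [PySem.Set.contains, hx]
  · simpa [PySem.Set.contains] using h
  · simp [PySem.Set.contains]
  · exact PySem.List.nodup_dedup UL
  · exact (PySem.List.mem_dedup UL u).mpr hu

theorem pv_pvm_pos (UL : List String) (vis : PySem.Set String) (u : String)
    (hu : u ∈ UL) (h : PySem.Set.contains vis u = false) : 1 ≤ pvm UL vis := by
  unfold pvm
  have : u ∈ (PySem.List.dedup UL).filter (fun x => !(PySem.Set.contains vis x)) := by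
    rw [List.mem_filter]
    exact ⟨(PySem.List.mem_dedup UL u).mpr hu, by simp [PySem.Set.contains]; simpa [PySem.Set.contains] using h⟩
  exact List.length_pos_of_mem this

theorem pv_get?_update_values {κ ν : Type} [BEq κ] [LawfulBEq κ]
    (l : List (κ × ν)) :
    ∀ (d : PySem.Dict κ ν) (k : κ) (v : ν),
      (l.foldl (fun acc p => acc.insert p.1 p.2) d).get? k = some v →
      v ∈ l.map Prod.snd ∨ d.get? k = some v := by
  classical
  induction l with
  | nil => intro d k v h; exact Or.inr h
  | cons p t ih =>
    intro d k v h
    rcases ih (d.insert p.1 p.2) k v h with hmem | hget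
    · exact Or.inl (List.mem_cons_of_mem _ hmem)
    · rw [PySem.Dict.get?_insert] at hget
      split at hget
      · have hv : v = p.2 := (Option.some.inj hget).symm
        exact Or.inl (by simp [hv])
      · exact Or.inr hget

theorem pv_mem_children (adjacency : List (String × List String)) (u x : String)
    (hx : x ∈ pvChildren adjacency u) : x ∈ adjacency.flatMap Prod.snd := by
  unfold pvChildren at hx
  rw [PySem.List.mem_sorted] at hx
  rw [PySem.Dict.getD_eq_get?_getD] at hx
  cases hget : (PySem.Dict.ofList adjacency).get? u with
  | none => rw [hget] at hx; simp at hx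
  | some v =>
    rw [hget] at hx
    simp at hx
    have := pv_get?_update_values adjacency PySem.Dict.empty u v hget
    rcases this with hv | hv
    · rcases List.mem_map.mp hv with ⟨pr, hpr, rfl⟩
      exact List.mem_flatMap.mpr ⟨pr, hpr, hx⟩
    · rw [PySem.Dict.get?_empty] at hv; cases hv

-- the main bridge: running the stack machine on a block of urls equals folding A's
-- recursive build_submap over them, with exact fuel/visited accounting
theorem pvMain (adjacency : List (String × List String)) (UL : List String)
    (hU : ∀ u x, x ∈ pvChildren adjacency u → x ∈ UL) :
    ∀ (n : Nat) (cs : List String) (vis : PySem.Set String) (lines : List String)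
      (tail : List PvItem) (f g : Nat),
      pvm UL vis ≤ n → (∀ c ∈ cs, c ∈ UL) → pvm UL vis < f → pvm UL vis < g →
      (pvLoop adjacency g vis lines (cs.map PvItem.url ++ tail)
          = pvLoop adjacency
              (g - ((cs.foldl (fun s c => pvBuildSubmap adjacency f s c) (vis, lines)).1.length - vis.length))
              (cs.foldl (fun s c => pvBuildSubmap adjacency f s c) (vis, lines)).1
              (cs.foldl (fun s c => pvBuildSubmap adjacency f s c) (vis, lines)).2 tail)
        ∧ vis.length ≤ (cs.foldl (fun s c => pvBuildSubmap adjacency f s c) (vis, lines)).1.length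
        ∧ pvm UL (cs.foldl (fun s c => pvBuildSubmap adjacency f s c) (vis, lines)).1
            + ((cs.foldl (fun s c => pvBuildSubmap adjacency f s c) (vis, lines)).1.length - vis.length)
            = pvm UL vis := by
  intro n
  induction n using Nat.strong_induction_on with
  | _ n ih =>
  intro cs
  induction cs with
  | nil =>
    intro vis lines tail f g _ _ _ _
    refine ⟨?_, le_refl _, ?_⟩ <;> simp
  | cons c cs' ihcs =>
    intro vis lines tail f g hn hcs hf hg
    have hcUL : c ∈ UL := hcs c List.mem_cons_self
    obtain ⟨f', rfl⟩ : ∃ f', f = f' + 1 := ⟨f - 1, by omega⟩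
    obtain ⟨g', rfl⟩ : ∃ g', g = g' + 1 := ⟨g - 1, by omega⟩
    by_cases hc : PySem.Set.contains vis c = true
    · -- already visited: A's build_submap returns, B's loop emits nothing
      have hcm : c ∈ vis := by simpa [PySem.Set.contains] using hc
      have hA : pvBuildSubmap adjacency (f' + 1) (vis, lines) c = (vis, lines) := by
        simp [pvBuildSubmap, hcm]
      have hB : pvLoop adjacency (g' + 1) vis lines
            ((c :: cs').map PvItem.url ++ tail)
          = pvLoop adjacency (g' + 1) vis lines (cs'.map PvItem.url ++ tail) := by
        rw [List.map_cons, List.cons_append, pvLoop]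
        simp [hcm]
      rw [List.foldl_cons]
      simp only [hA, hB]
      exact ihcs vis lines tail (f' + 1) (g' + 1) hn
        (fun x hx => hcs x (List.mem_cons_of_mem _ hx)) hf hg
    · -- new url
      have hc' : PySem.Set.contains vis c = false := by simpa using hc
      have hcm : c ∉ vis := by simpa [PySem.Set.contains] using hc'
      have hadd : PySem.Set.add vis c = vis ++ [c] := pv_add_eq_append vis c hc'
      have hm2 : pvm UL (vis ++ [c]) + 1 = pvm UL vis := pv_pvm_append UL vis c hcUL hc'
      have hpos : 1 ≤ pvm UL vis := pv_pvm_pos UL vis c hcUL hc'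
      have hcs' : ∀ x ∈ cs', x ∈ UL := fun x hx => hcs x (List.mem_cons_of_mem _ hx)
      cases hemp : (pvChildren adjacency c).isEmpty with
      | true =>
        -- no children: A appends "<li>c" "</li>"; B does the same and pops on
        have he : pvChildren adjacency c = [] := by simpa using hemp
        have hA : pvBuildSubmap adjacency (f' + 1) (vis, lines) c
            = (vis ++ [c], lines ++ ["<li>" ++ c, "</li>"]) := by
          simp [pvBuildSubmap, hcm, hadd, he]
        have hB : pvLoop adjacency (g' + 1) vis lines ((c :: cs').map PvItem.url ++ tail)
            = pvLoop adjacency g' (vis ++ [c]) (lines ++ ["<li>" ++ c, "</li>"])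
                (cs'.map PvItem.url ++ tail) := by
          rw [List.map_cons, List.cons_append, pvLoop]
          simp [hcm, he]
        obtain ⟨ihEq, ihLen, ihM⟩ := ihcs (vis ++ [c]) (lines ++ ["<li>" ++ c, "</li>"]) tail
          (f' + 1) g' (by omega) hcs' (by omega) (by omega)
        rw [List.foldl_cons]
        simp only [hA, hB]
        simp only [List.length_append, List.length_cons, List.length_nil, Nat.zero_add] at ihLen ihM ⊢
        refine ⟨?_, by omega, by omega⟩
        rw [ihEq]
        have harith : g' - (List.length (List.foldl (fun s c => pvBuildSubmap adjacency (f' + 1) s c)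
              (vis ++ [c], lines ++ ["<li>" ++ c, "</li>"]) cs').1 - (vis ++ [c]).length)
            = g' + 1 - (List.length (List.foldl (fun s c => pvBuildSubmap adjacency (f' + 1) s c)
              (vis ++ [c], lines ++ ["<li>" ++ c, "</li>"]) cs').1 - vis.length) := by
          simp only [List.length_append, List.length_cons, List.length_nil, Nat.zero_add]
          omega
        rw [harith]
      | false =>
        -- children: A recurses over them; B pushes them with a close marker
        have he : pvChildren adjacency c ≠ [] := by simpa using hemp
        have hcs2 : ∀ x ∈ pvChildren adjacency c, x ∈ UL := fun x hx => hU c x hx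
        obtain ⟨hEq2, hLen2, hM2⟩ := ih (pvm UL (vis ++ [c])) (by omega) (pvChildren adjacency c)
          (vis ++ [c]) (lines ++ ["<li>" ++ c, "<ul>"])
          (PvItem.close :: (cs'.map PvItem.url ++ tail)) f' g'
          (le_refl _) hcs2 (by omega) (by omega)
        have hA : pvBuildSubmap adjacency (f' + 1) (vis, lines) c
            = ((List.foldl (fun s c => pvBuildSubmap adjacency f' s c)
                  (vis ++ [c], lines ++ ["<li>" ++ c, "<ul>"]) (pvChildren adjacency c)).1,
               (List.foldl (fun s c => pvBuildSubmap adjacency f' s c)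
                  (vis ++ [c], lines ++ ["<li>" ++ c, "<ul>"]) (pvChildren adjacency c)).2
                 ++ ["</ul>", "</li>"]) := by
          simp [pvBuildSubmap, hcm, hadd, he]
        have hB : pvLoop adjacency (g' + 1) vis lines ((c :: cs').map PvItem.url ++ tail)
            = pvLoop adjacency g' (vis ++ [c]) (lines ++ ["<li>" ++ c, "<ul>"])
                ((pvChildren adjacency c).map PvItem.url
                  ++ (PvItem.close :: (cs'.map PvItem.url ++ tail))) := by
          rw [List.map_cons, List.cons_append, pvLoop]
          simp [hcm, he]
        set st2 := List.foldl (fun s c => pvBuildSubmap adjacency f' s c)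
            (vis ++ [c], lines ++ ["<li>" ++ c, "<ul>"]) (pvChildren adjacency c) with hst2
        have hClose : pvLoop adjacency (g' - (st2.1.length - (vis ++ [c]).length)) st2.1 st2.2
              (PvItem.close :: (cs'.map PvItem.url ++ tail))
            = pvLoop adjacency (g' - (st2.1.length - (vis ++ [c]).length)) st2.1
              (st2.2 ++ ["</ul>", "</li>"]) (cs'.map PvItem.url ++ tail) := by
          rw [pvLoop]; simp
        obtain ⟨ihEq, ihLen, ihM⟩ := ihcs st2.1 (st2.2 ++ ["</ul>", "</li>"]) tail
          (f' + 1) (g' - (st2.1.length - (vis ++ [c]).length))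
          (by simp only [List.length_append, List.length_cons, List.length_nil, Nat.zero_add] at hM2 hm2 ⊢; omega)
          hcs' (by omega) (by simp only [List.length_append, List.length_cons, List.length_nil, Nat.zero_add] at hM2 hLen2 ⊢; omega)
        rw [List.foldl_cons]
        simp only [hA, hB]
        rw [hEq2, hClose, ihEq]
        simp only [List.length_append, List.length_cons, List.length_nil, Nat.zero_add] at ihLen ihM hLen2 hM2 ⊢
        refine ⟨?_, by omega, by omega⟩
        have harith : (g' - (st2.1.length - (vis.length + 1))) -
              ((List.foldl (fun s c => pvBuildSubmap adjacency (f' + 1) s c)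
                (st2.1, st2.2 ++ ["</ul>", "</li>"]) cs').1.length - st2.1.length)
            = g' + 1 - ((List.foldl (fun s c => pvBuildSubmap adjacency (f' + 1) s c)
                (st2.1, st2.2 ++ ["</ul>", "</li>"]) cs').1.length - vis.length) := by
          omega
        rw [harith]

theorem pv_len_foldl_add :
    ∀ (l : List String) (s : PySem.Set String),
      (l.foldl PySem.Set.add s).length ≤ s.length + l.length := by
  intro l
  induction l with
  | nil => intro s; simp
  | cons x t ih =>
    intro s
    have hadd : (PySem.Set.add s x).length ≤ s.length + 1 := by
      unfold PySem.Set.add; split <;> simp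
    calc ((x :: t).foldl PySem.Set.add s).length
        = (t.foldl PySem.Set.add (PySem.Set.add s x)).length := by simp
      _ ≤ (PySem.Set.add s x).length + t.length := ih _
      _ ≤ s.length + (t.length + 1) := by omega
      _ = s.length + (x :: t).length := by simp

theorem pv_pvm_le (UL : List String) (vis : PySem.Set String) : pvm UL vis ≤ UL.length := by
  unfold pvm
  calc ((PySem.List.dedup UL).filter _).length
      ≤ (PySem.List.dedup UL).length := List.length_filter_le _ _
    _ ≤ UL.length := by
        rw [PySem.List.dedup_eq_ofList, PySem.Set.ofList_eq_foldl]
        simpa using pv_len_foldl_add UL []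

-- ===== VERDICT (by name: the statement is the Claim_ definition above) =====
theorem build_html_site_map_spec : Claim_equal_build_html_site_map := by
  unfold Claim_equal_build_html_site_map Spec_build_html_site_map
  intro base_url adjacency _
  unfold build_html_site_map build_html_site_map_alt
  have hU : ∀ u x, x ∈ pvChildren adjacency u → x ∈ base_url :: adjacency.flatMap Prod.snd :=
    fun u x hx => List.mem_cons_of_mem _ (pv_mem_children adjacency u x hx)
  have hm := pv_pvm_le (base_url :: adjacency.flatMap Prod.snd) PySem.Set.empty
  obtain ⟨hEq, -, -⟩ := pvMain adjacency (base_url :: adjacency.flatMap Prod.snd) hU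
    (pvm (base_url :: adjacency.flatMap Prod.snd) PySem.Set.empty)
    [base_url] PySem.Set.empty ["<h1>Site Map for " ++ base_url ++ "</h1>", "<ul>"] []
    ((base_url :: adjacency.flatMap Prod.snd).length + 1)
    ((base_url :: adjacency.flatMap Prod.snd).length + 1)
    (le_refl _) (by intro c hc; simp only [List.mem_singleton] at hc; exact hc ▸ List.mem_cons_self) (by omega) (by omega)
  simp only [List.map_cons, List.map_nil, List.cons_append, List.nil_append,
    List.foldl_cons, List.foldl_nil] at hEq
  rw [hEq]
  rw [pvLoop]
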